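-- pv_equiv track=rewrite | github.com/pypi-data/pypi-mirror-396 | packages/ft260/ft260-0.1.4-py3-none-any.whl/ft260/__init__.py | _select_report_id
-- ===== SOURCE A (Python) =====
-- def _select_report_id(length: int) -> int:
--     if length <= 4:
--         return 0xD0
--     report_ids = [0xD1, 0xD2, 0xD3, 0xD4, 0xD5, 0xD6, 0xD7, 0xD8, 0xD9, 0xDA, 0xDB, 0xDC, 0xDD, 0xDE]
--     size = 8
--     for report in report_ids:
--         if length <= size:
--             return report
--         size += 4
--     raise ValueError("Payload too large for single HID report")
-- ===== SOURCE B (Python) =====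
-- def _select_report_id(length: int) -> int:
--     if length <= 4:
--         return 0xD0
--     n = (length - 4 + 3) // 4
--     if n > 14:
--         raise ValueError("Payload too large for single HID report")
--     return 0xD0 + n
-- ===== Notes on version B (the rewrite author's own statement) =====
-- stated objective: simpler
-- what changed: Replaced the 14-step scan over a report-id list with a ceiling-division closed form (0xD0 + ceil((length-4)/4)).
import Mathlib
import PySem

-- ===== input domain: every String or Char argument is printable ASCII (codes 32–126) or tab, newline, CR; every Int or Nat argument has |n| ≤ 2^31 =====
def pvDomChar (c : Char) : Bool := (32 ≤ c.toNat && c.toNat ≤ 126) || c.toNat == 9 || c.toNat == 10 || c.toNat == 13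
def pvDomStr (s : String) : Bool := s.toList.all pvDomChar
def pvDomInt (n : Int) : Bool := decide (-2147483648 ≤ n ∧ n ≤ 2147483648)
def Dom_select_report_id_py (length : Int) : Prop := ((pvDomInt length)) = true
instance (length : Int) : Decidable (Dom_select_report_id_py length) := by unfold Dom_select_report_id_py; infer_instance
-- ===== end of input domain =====

-- B replaces A's 14-step scan by a ceiling-division closed form (objective: simpler).

-- ===== PORT A =====
-- the for-loop over report_ids with the growing size threshold; none = the ValueError path
def selA_loop (reports : List Int) (size : Int) (length : Int) : Option Int :=
  match reports with
  | [] => none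
  | r :: rs => if length ≤ size then some r else selA_loop rs (size + 4) length

def select_report_id_py (length : Int) : Int :=
  if length ≤ 4 then 0xD0
  else (selA_loop [0xD1, 0xD2, 0xD3, 0xD4, 0xD5, 0xD6, 0xD7, 0xD8, 0xD9, 0xDA, 0xDB, 0xDC, 0xDD, 0xDE] 8 length).getD 0

-- ===== PORT B =====
def select_report_id_py_alt (length : Int) : Int :=
  if length ≤ 4 then 0xD0
  else
    let n := PySem.Int.floordiv (length - 4 + 3) 4
    (if n > 14 then none else some (0xD0 + n)).getD 0   -- none = the ValueError path

-- ===== PRECONDITION & SPEC =====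
-- Pre_ excludes length > 60, on which BOTH A and B raise ValueError("Payload too large for single HID report").
def Pre_select_report_id_py (length : Int) : Prop := length ≤ 60
instance (length : Int) : Decidable (Pre_select_report_id_py length) := by unfold Pre_select_report_id_py; infer_instance
def pvWitness_select_report_id_py : Int := 17
def Spec_select_report_id_py (length : Int) (out : Int) : Prop := out = select_report_id_py_alt length
instance (length : Int) (out : Int) : Decidable (Spec_select_report_id_py length out) := by unfold Spec_select_report_id_py; infer_instance

-- ===== CLAIM (what is proved, stated in full; the proofs are below) =====
def Claim_equal_select_report_id_py : Prop := ∀ (length : Int), Dom_select_report_id_py length → Pre_select_report_id_py length → Spec_select_report_id_py length (select_report_id_py length)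

-- ===== LEMMAS AND PROOFS =====
set_option maxHeartbeats 1000000 in
theorem select_report_id_py_spec : Claim_equal_select_report_id_py := by
  intro length _ hpre
  unfold Spec_select_report_id_py
  unfold Pre_select_report_id_py at hpre
  by_cases h4 : length ≤ 4
  · simp [select_report_id_py, select_report_id_py_alt, h4]
  · have h5 : 5 ≤ length := by omega
    interval_cases length <;> decide
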